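-- pv_equiv track=rewrite | github.com/alpdenizz/PythonPlayground | my02/asn1_encoder.py | asn1_len
-- ===== SOURCE A (Python) =====
-- def asn1_len(content_str):
--     # helper function - should be used in other functions to calculate length octet(s)
--     # content - bytestring that contains TLV content octet(s)
--     # returns length (L) octet(s) for TLV
--     length = len(content_str)
--     if (length <= 127):
--         return chr(length)
--     else:
--         counter = 0
--         content = ''
--         while True:
--             masked = length & 0b11111111
--             content = chr(masked) + content
--             length = length >> 8
--             if length == 0:
--                 return chr(0x80 + counter + 1) + content
--             else:
--                 counter = counter + 1
-- ===== SOURCE B (Python) =====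
-- def asn1_len(content_str):
--     # B: compute the long-form octet count in closed form (bit_length) and
--     # build the body big-endian with a forward join, instead of A's
--     # discovery while-loop that prepends bytes and counts iterations.
--     length = len(content_str)
--     if length <= 127:
--         return chr(length)
--     nbytes = (length.bit_length() + 7) // 8
--     body = ''.join(chr((length >> (8 * i)) & 0xFF) for i in reversed(range(nbytes)))
--     return chr(0x80 + nbytes) + body
-- ===== Notes on version B (the rewrite author's own statement) =====
-- stated objective: idiomatic
-- what changed: The long form computes the number of length octets in closed form from bit_length and emits the bytes big-endian with a single forward join, replacing A's while-loop that discovers the count by repeated shifting and prepending.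
import Mathlib
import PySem

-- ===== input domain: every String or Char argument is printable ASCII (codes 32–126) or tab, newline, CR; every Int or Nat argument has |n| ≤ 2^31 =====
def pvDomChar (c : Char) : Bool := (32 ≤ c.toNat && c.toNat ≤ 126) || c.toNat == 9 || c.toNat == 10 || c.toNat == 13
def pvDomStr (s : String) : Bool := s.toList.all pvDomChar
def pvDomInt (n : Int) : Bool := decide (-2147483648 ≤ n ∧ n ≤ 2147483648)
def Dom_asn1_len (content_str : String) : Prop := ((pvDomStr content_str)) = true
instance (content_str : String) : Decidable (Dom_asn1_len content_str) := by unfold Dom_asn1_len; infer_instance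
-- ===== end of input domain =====

-- B replaces A's count-while-shifting loop by a closed-form octet count (bit_length)
-- plus a forward big-endian join; same return value (idiomatic, not claimed faster).

-- ===== PORT A =====
-- A's while loop: state (length, counter, content); prepends the low byte each
-- iteration, shifts right by 8, returns when the shifted length hits 0.
def asn1LenLoop (length counter : Nat) (content : List Char) : String :=
  let masked := length &&& 255
  let content' := Char.ofNat masked :: content
  let length' := length >>> 8
  if length' = 0 then
    String.mk (Char.ofNat (0x80 + counter + 1) :: content')
  else
    asn1LenLoop length' (counter + 1) content'
termination_by length
decreasing_by
  simp only [Nat.shiftRight_eq_div_pow] at *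
  omega

def asn1_len (content_str : String) : String :=
  let length := content_str.toList.length
  if length ≤ 127 then String.mk [Char.ofNat length]
  else asn1LenLoop length 0 []

-- ===== PORT B =====
-- length.bit_length() for length > 0 is Nat.log2 length + 1 (exact on positives;
-- only reached with length ≥ 128 here).
def asn1_len_alt (content_str : String) : String :=
  let length := content_str.toList.length
  if length ≤ 127 then String.mk [Char.ofNat length]
  else
    let nbytes := (Nat.log2 length + 1 + 7) / 8
    let body := (List.range nbytes).reverse.map
      (fun i => Char.ofNat ((length >>> (8 * i)) &&& 255))
    String.mk (Char.ofNat (0x80 + nbytes) :: body)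

-- ===== PRECONDITION & SPEC =====
def Spec_asn1_len (content_str : String) (out : String) : Prop := out = asn1_len_alt content_str
instance (content_str : String) (out : String) : Decidable (Spec_asn1_len content_str out) := by unfold Spec_asn1_len; infer_instance

-- ===== CLAIM (what is proved, stated in full; the proofs are below) =====
def Claim_equal_asn1_len : Prop := ∀ (content_str : String), Dom_asn1_len content_str → Spec_asn1_len content_str (asn1_len content_str)

-- ===== LEMMAS AND PROOFS =====

-- proof-side characterisation of A's loop: number of base-256 digits and the digits
def pvDigits (n : Nat) : Nat :=
  if h : n < 256 then 1 else pvDigits (n / 256) + 1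
termination_by n
decreasing_by omega

def pvBytes (n : Nat) : List Char :=
  if h : n < 256 then [Char.ofNat n] else pvBytes (n / 256) ++ [Char.ofNat (n % 256)]
termination_by n
decreasing_by omega

theorem asn1LenLoop_eq (n : Nat) : ∀ c acc, 0 < n →
    asn1LenLoop n c acc = String.mk (Char.ofNat (0x80 + c + pvDigits n) :: (pvBytes n ++ acc)) := by
  induction n using Nat.strong_induction_on with
  | _ n ih =>
    intro c acc hn
    rw [asn1LenLoop]
    simp only [Nat.shiftRight_eq_div_pow, Nat.and_two_pow_sub_one_eq_mod n 8]
    show (if h : n / 2 ^ 8 = 0 then _ else _) = _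
    by_cases h : n / 2 ^ 8 = 0
    · have hlt : n < 256 := by omega
      rw [dif_pos h, pvDigits, pvBytes, dif_pos hlt, dif_pos hlt]
      have : n % 256 = n := Nat.mod_eq_of_lt hlt
      simp [this]
    · have hlt : ¬ n < 256 := by omega
      rw [dif_neg h, ih (n / 2 ^ 8) (by omega) (c + 1) _ (by omega)]
      have hD : pvDigits n = pvDigits (n / 256) + 1 := by rw [pvDigits, dif_neg hlt]
      have hB : pvBytes n = pvBytes (n / 256) ++ [Char.ofNat (n % 256)] := by
        rw [pvBytes, dif_neg hlt]
      have h256 : n / 2 ^ 8 = n / 256 := by norm_num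
      have h256' : n % 2 ^ 8 = n % 256 := by norm_num
      rw [hD, hB, h256, h256']
      have harith : 0x80 + (c + 1) + pvDigits (n / 256)
          = 0x80 + c + (pvDigits (n / 256) + 1) := by omega
      rw [harith]
      simp

theorem log2_div2 (n : Nat) (h : 2 ≤ n) : Nat.log2 n = Nat.log2 (n / 2) + 1 := by
  simp only [Nat.log2_eq_log_two, Nat.log_div_base]
  have : 0 < Nat.log 2 n := Nat.log_pos (by omega) h
  omega

theorem log2_div256 (n : Nat) (h : 256 ≤ n) : Nat.log2 n = Nat.log2 (n / 256) + 8 := by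
  have h1 := log2_div2 n (by omega)
  have h2 := log2_div2 (n / 2) (by omega)
  have h3 := log2_div2 (n / 2 / 2) (by omega)
  have h4 := log2_div2 (n / 2 / 2 / 2) (by omega)
  have h5 := log2_div2 (n / 2 / 2 / 2 / 2) (by omega)
  have h6 := log2_div2 (n / 2 / 2 / 2 / 2 / 2) (by omega)
  have h7 := log2_div2 (n / 2 / 2 / 2 / 2 / 2 / 2) (by omega)
  have h8 := log2_div2 (n / 2 / 2 / 2 / 2 / 2 / 2 / 2) (by omega)
  have e : n / 2 / 2 / 2 / 2 / 2 / 2 / 2 / 2 = n / 256 := by omega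
  rw [h1, h2, h3, h4, h5, h6, h7, h8, e]

theorem pvDigits_eq (n : Nat) : 0 < n → pvDigits n = Nat.log2 n / 8 + 1 := by
  induction n using Nat.strong_induction_on with
  | _ n ih =>
    intro hn
    rw [pvDigits]
    by_cases h : n < 256
    · rw [dif_pos h]
      have : Nat.log2 n ≤ 7 := by
        have := Nat.log2_lt (n := n) (by omega) (k := 8)
        omega
      omega
    · rw [dif_neg h, ih (n / 256) (by omega) (by omega), log2_div256 n (by omega)]
      omega

theorem pvBytes_eq (n : Nat) : 0 < n →
    (List.range (pvDigits n)).reverse.map (fun i => Char.ofNat ((n >>> (8 * i)) &&& 255))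
      = pvBytes n := by
  induction n using Nat.strong_induction_on with
  | _ n ih =>
    intro hn
    rw [pvDigits, pvBytes]
    by_cases h : n < 256
    · rw [dif_pos h, dif_pos h]
      simp [Nat.shiftRight_eq_div_pow, Nat.and_two_pow_sub_one_eq_mod n 8,
        Nat.mod_eq_of_lt h]
    · rw [dif_neg h, dif_neg h]
      rw [List.range_succ_eq_map]
      simp only [List.reverse_cons, List.map_append, List.map_map, List.map_reverse]
      rw [← List.map_reverse]
      have hshift : ∀ i, n >>> (8 * (i + 1)) = (n / 256) >>> (8 * i) := by
        intro i
        simp [Nat.shiftRight_eq_div_pow, pow_succ, pow_mul, Nat.div_div_eq_div_mul, Nat.mul_comm]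
        congr 1
        ring
      have : ((List.range (pvDigits (n / 256))).reverse.map
          (fun i => Char.ofNat ((n >>> (8 * (i + 1))) &&& 255)))
          = pvBytes (n / 256) := by
        rw [← ih (n / 256) (by omega) (by omega)]
        apply List.map_congr_left
        intro i _
        rw [hshift i]
      rw [show ((fun i => Char.ofNat ((n >>> (8 * i)) &&& 255)) ∘ (fun i => i + 1))
          = (fun i => Char.ofNat ((n >>> (8 * (i + 1))) &&& 255)) from rfl, this]
      simp [Nat.shiftRight_eq_div_pow, Nat.and_two_pow_sub_one_eq_mod n 8]

-- ===== VERDICT (by name: the statement is the Claim_ definition above) =====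
theorem asn1_len_spec : Claim_equal_asn1_len := by
  intro s _
  unfold Spec_asn1_len asn1_len asn1_len_alt
  set L := s.toList.length with hL
  by_cases h : L ≤ 127
  · simp [h]
  · simp only [h, if_false]
    rw [asn1LenLoop_eq L 0 [] (by omega)]
    have hd : pvDigits L = (Nat.log2 L + 1 + 7) / 8 := by
      rw [pvDigits_eq L (by omega)]; omega
    rw [← hd, ← pvBytes_eq L (by omega)]
    simp
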